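-- pv_equiv track=rewrite | github.com/AlexGooodman/tg_bot_classif | tg_farm_bot/core/parser_logic/finaly_dict.py | recursiv_add_groups
-- ===== SOURCE A (Python) =====
-- def recursiv_add_groups(group, enum, length, words1, dict_group_value):
--     """Рекурсия. Добавляет строки в словарь, если длина списка > 1"""
--     if length < len(words1[enum]):
--         if  len(words1[enum][length]) < 1:
--             return False
--         else:
--             dict_group_value[("".join(words1[enum][length])).rstrip('. \t;')] = (''.join(group).strip('., '))
--             return recursiv_add_groups(group, enum, length+1, words1, dict_group_value)
--     return True
-- ===== SOURCE B (Python) =====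
-- def recursiv_add_groups(group, enum, length, words1, dict_group_value):
--     """Iterative re-implementation: one for-loop over range(length, len(row)),
--     with the joined/stripped group value computed once up front.
--     Performs the same in-place mutation of dict_group_value as the original."""
--     value = ''.join(group).strip('., ')
--     row = words1[enum]
--     for i in range(length, len(row)):
--         piece = row[i]
--         if not piece:
--             return False
--         dict_group_value[''.join(piece).rstrip('. \t;')] = value
--     return True
-- ===== Notes on version B (the rewrite author's own statement) =====
-- stated objective: idiomatic
-- what changed: The recursion (one call per element, re-joining and re-stripping the group string on every call) is replaced by a single for-loop over range(length, len(row)) with the group value computed once before the loop.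
import Mathlib
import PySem

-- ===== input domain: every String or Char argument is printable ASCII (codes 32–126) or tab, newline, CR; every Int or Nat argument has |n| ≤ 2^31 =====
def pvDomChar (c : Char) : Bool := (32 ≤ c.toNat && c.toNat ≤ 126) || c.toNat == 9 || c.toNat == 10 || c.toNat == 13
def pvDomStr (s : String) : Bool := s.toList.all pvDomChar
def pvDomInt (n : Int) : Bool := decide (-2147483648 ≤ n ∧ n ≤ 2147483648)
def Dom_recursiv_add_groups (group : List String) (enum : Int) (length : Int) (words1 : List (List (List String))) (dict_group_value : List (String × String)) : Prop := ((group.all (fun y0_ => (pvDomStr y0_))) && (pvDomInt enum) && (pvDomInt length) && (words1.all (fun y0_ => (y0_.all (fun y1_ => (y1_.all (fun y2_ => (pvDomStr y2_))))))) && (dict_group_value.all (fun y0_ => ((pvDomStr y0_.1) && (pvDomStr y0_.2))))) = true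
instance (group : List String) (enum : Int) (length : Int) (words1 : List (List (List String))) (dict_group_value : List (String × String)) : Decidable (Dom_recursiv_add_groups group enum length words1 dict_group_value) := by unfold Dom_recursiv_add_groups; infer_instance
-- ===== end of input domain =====

-- B replaces A's recursion by one iterative for-loop with the group value joined/stripped once (idiomatic).
-- Both programs mutate dict_group_value identically in Python; the equivalence proved here is about the RETURN value.

-- exact hand port of str.rstrip(chars): drop trailing characters that occur in chars
def pyRstripChars (s : String) (chars : String) : String :=
  String.ofList (((s.toList.reverse).dropWhile (fun c => chars.toList.contains c)).reverse)

-- ===== PORT A =====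
def recursiv_add_groups (group : List String) (enum : Int) (length : Int) (words1 : List (List (List String))) (dict_group_value : List (String × String)) : Bool :=
  match h : PySem.List.pyGet? words1 enum with
  | none => false   -- Python: IndexError on words1[enum]; outside Pre_
  | some row =>
    if hlt : length < (row.length : Int) then
      match PySem.List.pyGet? row length with
      | none => false   -- Python: IndexError on words1[enum][length]; outside Pre_
      | some elem =>
        if (elem.length : Int) < 1 then false
        else
          recursiv_add_groups group enum (length + 1) words1
            ((PySem.Dict.insert (PySem.Dict.mk dict_group_value)
                (pyRstripChars (PySem.Str.join "" elem) ". \t;")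
                (PySem.Str.stripChars (PySem.Str.join "" group) "., ")).items)
    else true
termination_by ((PySem.List.pyGet? words1 enum).elim 0 (fun row => ((row.length : Int) - length).toNat))
decreasing_by simp only [h, Option.elim]; omega

-- ===== PORT B =====
-- the for-loop of Source B: walk the range's indices, early-return False on an empty element
def altLoop (row : List (List String)) (value : String) (idxs : List Int) (dict : PySem.Dict String String) : Bool :=
  match idxs with
  | [] => true
  | i :: rest =>
    match PySem.List.pyGet? row i with
    | none => false   -- Python: IndexError; outside Pre_
    | some piece =>
      if piece = [] then false
      else altLoop row value rest (dict.insert (pyRstripChars (PySem.Str.join "" piece) ". \t;") value)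

def recursiv_add_groups_alt (group : List String) (enum : Int) (length : Int) (words1 : List (List (List String))) (dict_group_value : List (String × String)) : Bool :=
  let value := PySem.Str.stripChars (PySem.Str.join "" group) "., "
  match PySem.List.pyGet? words1 enum with
  | none => false   -- Python: IndexError on words1[enum]; outside Pre_
  | some row =>
    altLoop row value (PySem.List.pyRange length (row.length : Int) 1) (PySem.Dict.mk dict_group_value)

-- ===== PRECONDITION & SPEC =====
-- Pre_: words1[enum] must be a valid (possibly negative) index, and length ≥ -len(words1[enum])
-- (otherwise the Python raises IndexError); exactly the inputs on which A returns normally.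
def Pre_recursiv_add_groups (group : List String) (enum : Int) (length : Int) (words1 : List (List (List String))) (dict_group_value : List (String × String)) : Prop :=
  ((PySem.List.pyGet? words1 enum).elim false
    (fun row => decide (-(row.length : Int) ≤ length))) = true
instance (group : List String) (enum : Int) (length : Int) (words1 : List (List (List String))) (dict_group_value : List (String × String)) : Decidable (Pre_recursiv_add_groups group enum length words1 dict_group_value) := by unfold Pre_recursiv_add_groups; infer_instance

def pvWitness_recursiv_add_groups : List String × Int × Int × List (List (List String)) × (List (String × String)) :=
  (["ab", "c., "], 0, 0, [[["x"], ["y", "."]]], [])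

def Spec_recursiv_add_groups (group : List String) (enum : Int) (length : Int) (words1 : List (List (List String))) (dict_group_value : List (String × String)) (out : Bool) : Prop := out = recursiv_add_groups_alt group enum length words1 dict_group_value
instance (group : List String) (enum : Int) (length : Int) (words1 : List (List (List String))) (dict_group_value : List (String × String)) (out : Bool) : Decidable (Spec_recursiv_add_groups group enum length words1 dict_group_value out) := by unfold Spec_recursiv_add_groups; infer_instance

-- ===== CLAIM (what is proved, stated in full; the proofs are below) =====
def Claim_equal_recursiv_add_groups : Prop := ∀ (group : List String) (enum : Int) (length : Int) (words1 : List (List (List String))) (dict_group_value : List (String × String)), Dom_recursiv_add_groups group enum length words1 dict_group_value → Pre_recursiv_add_groups group enum length words1 dict_group_value → Spec_recursiv_add_groups group enum length words1 dict_group_value (recursiv_add_groups group enum length words1 dict_group_value)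

-- ===== LEMMAS AND PROOFS =====

theorem pvWitness_ok :
    Dom_recursiv_add_groups (pvWitness_recursiv_add_groups.1) (pvWitness_recursiv_add_groups.2.1) (pvWitness_recursiv_add_groups.2.2.1) (pvWitness_recursiv_add_groups.2.2.2.1) (pvWitness_recursiv_add_groups.2.2.2.2) ∧
    Pre_recursiv_add_groups (pvWitness_recursiv_add_groups.1) (pvWitness_recursiv_add_groups.2.1) (pvWitness_recursiv_add_groups.2.2.1) (pvWitness_recursiv_add_groups.2.2.2.1) (pvWitness_recursiv_add_groups.2.2.2.2) := by
  decide

-- main loop invariant: with words1[enum] = row and length ≥ -len(row), A's recursion equals B's loop,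
-- for any dictionary contents d
theorem main_loop (row : List (List String)) (group : List String) (enum : Int)
    (words1 : List (List (List String))) :
    ∀ (n : Nat) (length : Int) (d : List (String × String)),
      (((row.length : Int) - length).toNat = n) →
      PySem.List.pyGet? words1 enum = some row →
      -(row.length : Int) ≤ length →
      recursiv_add_groups group enum length words1 d =
        altLoop row (PySem.Str.stripChars (PySem.Str.join "" group) "., ")
          (PySem.List.pyRange length (row.length : Int) 1) (PySem.Dict.mk d) := by
  intro n
  induction n with
  | zero =>
    intro length d hn hrow hge
    have hle : (row.length : Int) ≤ length := by omega
    rw [recursiv_add_groups, hrow]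
    split
    · rename_i heq; simp at heq
    · rename_i row' heq
      injection heq with heq'; subst heq'
      rw [dif_neg (by omega : ¬ length < (row.length : Int)), PySem.List.pyRange_one_eq_nil hle]
      rfl
  | succ m ih =>
    intro length d hn hrow hge
    have hlt : length < (row.length : Int) := by omega
    have hin : PySem.Raise.InRange row.length length := by
      exact ⟨by omega, by omega⟩
    obtain ⟨elem, helem⟩ : ∃ e, PySem.List.pyGet? row length = some e := by
      cases he : PySem.List.pyGet? row length with
      | none => exact absurd ((PySem.List.pyGet?_eq_none_iff row length).mp he) (by simpa using hin)
      | some e => exact ⟨e, rfl⟩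
    rw [recursiv_add_groups, hrow]
    split
    · rename_i heq; simp at heq
    rename_i row' heq
    injection heq with heq'; subst heq'
    rw [dif_pos hlt, PySem.List.pyRange_one_cons hlt]
    simp only [helem, altLoop]
    by_cases hempty : elem = []
    · subst hempty; simp
    · have hlen : ¬ ((elem.length : Int) < 1) := by
        have : 0 < elem.length := List.length_pos_iff.mpr hempty
        omega
      rw [if_neg hlen, if_neg hempty]
      have := ih (length + 1)
        ((PySem.Dict.insert (PySem.Dict.mk d)
            (pyRstripChars (PySem.Str.join "" elem) ". \t;")
            (PySem.Str.stripChars (PySem.Str.join "" group) "., ")).items)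
        (by omega) hrow (by omega)
      rw [this]

-- ===== VERDICT (by name: the statement is the Claim_ definition above) =====
theorem recursiv_add_groups_spec : Claim_equal_recursiv_add_groups := by
  intro group enum length words1 d _hDom hPre
  unfold Spec_recursiv_add_groups recursiv_add_groups_alt
  unfold Pre_recursiv_add_groups at hPre
  cases hrow : PySem.List.pyGet? words1 enum with
  | none => simp [hrow] at hPre
  | some row =>
    rw [hrow] at hPre
    simp only [Option.elim, decide_eq_true_eq] at hPre
    simp only
    exact main_loop row group enum words1 (((row.length : Int) - length).toNat) length d rfl hrow hPre
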